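-- pv_equiv track=rewrite | github.com/Enjef/Algo | 700 - 799/717 - 1-bit and 2-bit Characters/717 - 1-bit and 2-bit Characters.py | isOneBitCharacter_best_memory
-- ===== SOURCE A (Python) =====
-- from typing import List
--
-- def isOneBitCharacter_best_memory(bits: List[int]) -> bool:
--     if not bits:
--         return False
--     n = len(bits)
--     i = 0
--     while i < n:
--         if i == n-1:
--             return True
--         if bits[i] == 1:
--             i += 2
--         else:
--             i += 1
--     return False
-- ===== SOURCE B (Python) =====
-- def isOneBitCharacter_best_memory(bits):
--     if not bits:
--         return False
--     ones = 0
--     i = len(bits) - 2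
--     while i >= 0 and bits[i] == 1:
--         ones += 1
--         i -= 1
--     return ones % 2 == 0
-- ===== Notes on version B (the rewrite author's own statement) =====
-- stated objective: faster
-- what changed: Replaced A's forward index walk over the whole list (step 2 on a 1, step 1 otherwise, checking whether it lands exactly on the last index) by a backward scan that counts only the consecutive 1s immediately before the last element and returns whether that count is even, so B stops at the first non-1 instead of traversing everything.
import Mathlib
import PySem

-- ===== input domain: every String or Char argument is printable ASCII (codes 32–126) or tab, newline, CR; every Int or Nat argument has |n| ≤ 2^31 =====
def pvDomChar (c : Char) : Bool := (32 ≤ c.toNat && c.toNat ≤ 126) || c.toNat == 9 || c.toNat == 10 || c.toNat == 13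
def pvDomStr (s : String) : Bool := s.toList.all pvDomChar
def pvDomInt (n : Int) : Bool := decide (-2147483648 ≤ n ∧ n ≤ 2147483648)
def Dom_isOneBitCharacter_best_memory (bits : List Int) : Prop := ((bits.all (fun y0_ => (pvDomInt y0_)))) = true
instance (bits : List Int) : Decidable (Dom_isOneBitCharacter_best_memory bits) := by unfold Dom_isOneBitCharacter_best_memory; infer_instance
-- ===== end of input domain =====

-- B replaces A's forward two-step parse by a backward scan counting trailing ones before the
-- last element and testing their parity; B stops at the first non-1 it meets (timing run measured B faster).

-- ===== PORT A =====
-- A's while loop over index i: 'i == n-1 → True; bits[i]==1 → i+=2; else i+=1; fell off → False',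
-- transcribed as recursion on the suffix starting at i.
def pvGoA : List Int → Bool
  | [] => false
  | [_] => true
  | x :: y :: rest => if x = 1 then pvGoA rest else pvGoA (y :: rest)

def isOneBitCharacter_best_memory (bits : List Int) : Bool :=
  if bits = [] then false else pvGoA bits

-- ===== PORT B =====
-- Source B's backward while loop 'while i >= 0 and bits[i] == 1: ones += 1; i -= 1' starting at
-- n-2, transcribed as counting leading ones of the reversed list after dropping the last element.
def pvOnes : List Int → Nat
  | [] => 0
  | x :: rest => if x = 1 then pvOnes rest + 1 else 0

def isOneBitCharacter_best_memory_alt (bits : List Int) : Bool :=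
  match bits.reverse with
  | [] => false
  | _ :: rest => pvOnes rest % 2 == 0

-- ===== PRECONDITION & SPEC =====
def Spec_isOneBitCharacter_best_memory (bits : List Int) (out : Bool) : Prop := out = isOneBitCharacter_best_memory_alt bits
instance (bits : List Int) (out : Bool) : Decidable (Spec_isOneBitCharacter_best_memory bits out) := by unfold Spec_isOneBitCharacter_best_memory; infer_instance

-- ===== CLAIM (what is proved, stated in full; the proofs are below) =====
def Claim_equal_isOneBitCharacter_best_memory : Prop := ∀ (bits : List Int), Dom_isOneBitCharacter_best_memory bits → Spec_isOneBitCharacter_best_memory bits (isOneBitCharacter_best_memory bits)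

-- ===== LEMMAS AND PROOFS =====

theorem pvOnes_append (s t : List Int) :
    pvOnes (s ++ t) = pvOnes s + (if pvOnes s = s.length then pvOnes t else 0) := by
  induction s with
  | nil => simp [pvOnes]
  | cons x s ih =>
      by_cases hx : x = 1
      · simp [pvOnes, hx, ih]
        split_ifs <;> omega
      · simp [pvOnes, hx]

theorem pvGoA_eq_alt (l : List Int) : pvGoA l = isOneBitCharacter_best_memory_alt l := by
  induction l using pvGoA.induct with
  | case1 => simp [pvGoA, isOneBitCharacter_best_memory_alt]
  | case2 x => simp [pvGoA, isOneBitCharacter_best_memory_alt, pvOnes]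
  | case3 y rest ih1 =>
      cases rest with
      | nil =>
          simp [pvGoA, isOneBitCharacter_best_memory_alt, pvOnes]
      | cons r rs =>
          have hne : (r :: rs).reverse ≠ [] := by simp
          obtain ⟨h, t, e⟩ : ∃ h t, (r :: rs).reverse = h :: t := by
            cases hrev : (r :: rs).reverse with
            | nil => exact absurd hrev hne
            | cons h t => exact ⟨h, t, rfl⟩
          have e2 : ((1 : Int) :: y :: r :: rs).reverse = h :: (t ++ [y, 1]) := by
            simp [List.reverse_cons, e]
          simp only [pvGoA] at *
          rw [ih1]
          simp only [isOneBitCharacter_best_memory_alt, e, e2]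
          rw [pvOnes_append]
          have hy : pvOnes [y, (1 : Int)] = (if y = 1 then 2 else 0) := by
            by_cases hy1 : y = 1 <;> simp [pvOnes, hy1]
          rw [hy]
          split_ifs with h1 h2 <;> simp
  | case4 x y rest hx ih =>
      have hne : (y :: rest).reverse ≠ [] := by simp
      obtain ⟨h, t, e⟩ : ∃ h t, (y :: rest).reverse = h :: t := by
        cases hrev : (y :: rest).reverse with
        | nil => exact absurd hrev hne
        | cons h t => exact ⟨h, t, rfl⟩
      have e2 : (x :: y :: rest).reverse = h :: (t ++ [x]) := by
        simp [List.reverse_cons, e]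
      simp only [pvGoA, if_neg hx]
      rw [ih]
      simp only [isOneBitCharacter_best_memory_alt, e, e2]
      rw [pvOnes_append]
      simp [pvOnes, hx]

-- ===== VERDICT (by name: the statement is the Claim_ definition above) =====
theorem isOneBitCharacter_best_memory_spec : Claim_equal_isOneBitCharacter_best_memory := by
  intro bits _
  unfold Spec_isOneBitCharacter_best_memory isOneBitCharacter_best_memory
  cases bits with
  | nil => simp [isOneBitCharacter_best_memory_alt]
  | cons x rest => simp [pvGoA_eq_alt]
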